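-- pv_equiv track=rewrite | github.com/mandersogit/brynhild-deno-plugin | scripts/commit-helper.py | _find_duplicate_files
-- ===== SOURCE A (Python) =====
-- import typing as _typing
--
-- def _find_duplicate_files(
--     commits: list[dict[str, _typing.Any]],
-- ) -> dict[str, list[int]]:
--     """Find files that appear in multiple commits.
--
--     Checks both 'files' and 'deleted' lists.
--
--     Returns dict mapping filename to list of commit indices (1-based).
--     """
--     file_commits: dict[str, list[int]] = {}
--     for i, commit in enumerate(commits, 1):
--         # Check regular files
--         for f in commit.get("files", []):
--             if f not in file_commits:
--                 file_commits[f] = []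
--             file_commits[f].append(i)
--         # Check deleted files
--         for f in commit.get("deleted", []):
--             if f not in file_commits:
--                 file_commits[f] = []
--             file_commits[f].append(i)
--
--     # Return only duplicates
--     return {f: commits for f, commits in file_commits.items() if len(commits) > 1}
-- ===== SOURCE B (Python) =====
-- import typing as _typing
--
-- def _find_duplicate_files(
--     commits: list[dict[str, _typing.Any]],
-- ) -> dict[str, list[int]]:
--     """Find files that appear in multiple commits (count table, then filtered collect)."""
--     # Pass 1: total occurrence count per filename across 'files' and 'deleted'.
--     counts: dict[str, int] = {}
--     for commit in commits:
--         for f in commit.get("files", []) + commit.get("deleted", []):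
--             counts[f] = counts.get(f, 0) + 1
--     # Pass 2: collect 1-based commit indices, but only for files seen more than once.
--     result: dict[str, list[int]] = {}
--     for i, commit in enumerate(commits, 1):
--         for f in commit.get("files", []) + commit.get("deleted", []):
--             if counts[f] > 1:
--                 result.setdefault(f, []).append(i)
--     return result
-- ===== Notes on version B (the rewrite author's own statement) =====
-- stated objective: alternative
-- what changed: Replaces build-full-index-then-filter with a two-pass scheme: a first pass builds only an occurrence-count table, a second pass re-scans the commits and collects indices solely for filenames whose total count exceeds 1.
import Mathlib
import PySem

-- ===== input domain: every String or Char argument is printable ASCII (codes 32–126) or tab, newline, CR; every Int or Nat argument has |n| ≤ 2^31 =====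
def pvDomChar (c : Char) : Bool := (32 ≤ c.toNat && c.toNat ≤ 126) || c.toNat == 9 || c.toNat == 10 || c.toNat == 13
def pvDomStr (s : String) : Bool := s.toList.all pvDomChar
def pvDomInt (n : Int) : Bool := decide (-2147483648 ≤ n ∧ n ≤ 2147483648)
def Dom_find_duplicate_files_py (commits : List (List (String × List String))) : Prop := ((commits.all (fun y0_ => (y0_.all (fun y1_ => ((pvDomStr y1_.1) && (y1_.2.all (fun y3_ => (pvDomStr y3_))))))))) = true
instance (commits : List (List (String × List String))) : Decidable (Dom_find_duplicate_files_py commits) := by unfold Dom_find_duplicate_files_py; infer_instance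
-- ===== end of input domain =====

-- B replaces A's build-full-index-then-filter by two passes: an occurrence-count table first,
-- then a re-scan collecting indices only for filenames counted more than once (objective: alternative).

-- ===== PORT A =====
-- commit.get(key, []): a commit dict is an association list; lookup = first match
def pvGet (commit : List (String × List String)) (key : String) : List String :=
  (List.lookup key commit).getD []

def find_duplicate_files_py (commits : List (List (String × List String))) : List (String × List Int) :=
  let file_commits : PySem.Dict String (List Int) :=
    (PySem.List.enumerate commits 1).foldl
      (fun fc ic =>
        -- Check regular files
        let fc := (pvGet ic.2 "files").foldl
          (fun fc f =>
            let fc := if fc.contains f = false then fc.insert f ([] : List Int) else fc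
            fc.modify f [] (fun l => l ++ [ic.1])) fc
        -- Check deleted files
        (pvGet ic.2 "deleted").foldl
          (fun fc f =>
            let fc := if fc.contains f = false then fc.insert f ([] : List Int) else fc
            fc.modify f [] (fun l => l ++ [ic.1])) fc)
      PySem.Dict.empty
  -- Return only duplicates
  file_commits.items.filter (fun q => q.2.length > 1)

-- ===== PORT B =====
def find_duplicate_files_py_alt (commits : List (List (String × List String))) : List (String × List Int) :=
  -- Pass 1: total occurrence count per filename across 'files' and 'deleted'
  let counts : PySem.Dict String Int :=
    commits.foldl
      (fun counts commit =>
        (pvGet commit "files" ++ pvGet commit "deleted").foldl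
          (fun counts f => counts.insert f (counts.getD f 0 + 1)) counts)
      PySem.Dict.empty
  -- Pass 2: collect 1-based indices, only for files seen more than once
  let result : PySem.Dict String (List Int) :=
    (PySem.List.enumerate commits 1).foldl
      (fun result ic =>
        (pvGet ic.2 "files" ++ pvGet ic.2 "deleted").foldl
          (fun result f =>
            if counts.getD f 0 > 1 then
              (result.setdefault f []).modify f [] (fun l => l ++ [ic.1])
            else result)
          result)
      PySem.Dict.empty
  result.items

-- ===== PRECONDITION & SPEC =====
def Spec_find_duplicate_files_py (commits : List (List (String × List String))) (out : List (String × List Int)) : Prop := out = find_duplicate_files_py_alt commits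
instance (commits : List (List (String × List String))) (out : List (String × List Int)) : Decidable (Spec_find_duplicate_files_py commits out) := by unfold Spec_find_duplicate_files_py; infer_instance

-- ===== CLAIM (what is proved, stated in full; the proofs are below) =====
def Claim_equal_find_duplicate_files_py : Prop := ∀ (commits : List (List (String × List String))), Dom_find_duplicate_files_py commits → Spec_find_duplicate_files_py commits (find_duplicate_files_py commits)

-- ===== LEMMAS AND PROOFS =====

-- The flat stream of (filename, 1-based commit index) occurrences both programs process.
def pvEntries (commits : List (List (String × List String))) : List (String × Int) :=
  (PySem.List.enumerate commits 1).flatMap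
    (fun ic => (pvGet ic.2 "files" ++ pvGet ic.2 "deleted").map (fun f => (f, ic.1)))

def pvKeys (commits : List (List (String × List String))) : List String :=
  (pvEntries commits).map Prod.fst

-- A's per-occurrence step, normalised.
def pvStep (d : PySem.Dict String (List Int)) (e : String × Int) : PySem.Dict String (List Int) :=
  d.modify e.1 [] (fun l => l ++ [e.2])

-- keep only the entries whose key satisfies p
def pvFilterK (p : String → Bool) (d : PySem.Dict String (List Int)) : PySem.Dict String (List Int) :=
  PySem.Dict.mk (d.items.filter (fun q => p q.1))

lemma pvStep_eq (d : PySem.Dict String (List Int)) (e : String × Int) :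
    pvStep d e = d.insert e.1 (d.getD e.1 [] ++ [e.2]) := rfl

-- A's guarded body is pvStep
lemma pvStepA_eq (d : PySem.Dict String (List Int)) (f : String) (i : Int) :
    ((if d.contains f = false then d.insert f ([] : List Int) else d).modify f []
        (fun l => l ++ [i])) = pvStep d (f, i) := by
  by_cases h : d.contains f = false
  · rw [if_pos h]
    show (d.insert f []).insert f ((d.insert f []).getD f [] ++ [i]) = _
    rw [PySem.Dict.getD_insert_self, PySem.Dict.insert_insert_self, pvStep_eq,
        PySem.Dict.getD_of_not_contains d _ h]
  · rw [if_neg h]; rfl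

-- B's guarded body is a key-guarded pvStep
lemma pvStepB_eq (r : PySem.Dict String (List Int)) (f : String) (i : Int) (c : Int) :
    (if c > 1 then (r.setdefault f []).modify f [] (fun l => l ++ [i]) else r)
      = (if c > 1 then pvStep r (f, i) else r) := by
  split
  · by_cases h : r.contains f
    · rw [PySem.Dict.setdefault_of_contains r _ h]; rfl
    · have h' : r.contains f = false := by simpa using h
      rw [PySem.Dict.setdefault_of_not_contains r _ h']
      show (r.insert f []).insert f ((r.insert f []).getD f [] ++ [i]) = _
      rw [PySem.Dict.getD_insert_self, PySem.Dict.insert_insert_self, pvStep_eq,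
          PySem.Dict.getD_of_not_contains r _ h']
  · rfl

-- get? on a literal dict is first-match lookup
lemma pvGet?_mk (l : List (String × List Int)) (x : String) :
    (PySem.Dict.mk l).get? x = List.lookup x l := by
  induction l with
  | nil => rfl
  | cons h t ih =>
    rcases h with ⟨a, b⟩
    rw [PySem.Dict.get?_mk_cons, List.lookup]
    by_cases hax : a = x
    · simp [hax]
    · have : (x == a) = false := by simp [Ne.symm hax]
      simp [hax, this, ih]

lemma pvLookup_filter (p : String → Bool) (l : List (String × List Int)) (x : String)
    (hp : p x = true) :
    List.lookup x (l.filter (fun q => p q.1)) = List.lookup x l := by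
  induction l with
  | nil => rfl
  | cons h t ih =>
    rcases h with ⟨a, b⟩
    by_cases hax : x = a
    · subst hax
      simp [hp, List.lookup]
    · have hne : (x == a) = false := by simp [hax]
      by_cases hpa : p a = true
      · simp [hpa, List.lookup, hne, ih]
      · simp only [Bool.not_eq_true] at hpa
        simp [hpa, List.lookup, hne, ih]

lemma pvGet?_filterK (p : String → Bool) (d : PySem.Dict String (List Int)) (x : String)
    (hp : p x = true) : (pvFilterK p d).get? x = d.get? x := by
  rcases d with ⟨l⟩
  rw [pvFilterK, pvGet?_mk, pvGet?_mk, pvLookup_filter p l x hp]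

lemma pvGetD_filterK (p : String → Bool) (d : PySem.Dict String (List Int)) (x : String)
    (dflt : List Int) (hp : p x = true) :
    (pvFilterK p d).getD x dflt = d.getD x dflt := by
  rw [PySem.Dict.getD_eq_get?_getD, PySem.Dict.getD_eq_get?_getD, pvGet?_filterK p d x hp]

lemma pvContains_filterK (p : String → Bool) (d : PySem.Dict String (List Int)) (x : String)
    (hp : p x = true) : (pvFilterK p d).contains x = d.contains x := by
  rw [PySem.Dict.contains_eq_isSome_get?, PySem.Dict.contains_eq_isSome_get?,
      pvGet?_filterK p d x hp]

lemma pvFilterK_insert_pos (p : String → Bool) (d : PySem.Dict String (List Int))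
    (f : String) (v : List Int) (hp : p f = true) :
    pvFilterK p (d.insert f v) = (pvFilterK p d).insert f v := by
  apply PySem.Dict.ext
  by_cases h : d.contains f = true
  · have h' : (pvFilterK p d).contains f = true := by rw [pvContains_filterK p d f hp]; exact h
    show ((d.insert f v).items.filter (fun q => p q.1)) = ((pvFilterK p d).insert f v).items
    rw [PySem.Dict.items_insert_of_contains d _ h,
        PySem.Dict.items_insert_of_contains _ _ h']
    show ((d.items.map (fun q => if q.1 == f then (f, v) else q)).filter (fun q => p q.1))
        = ((d.items.filter (fun q => p q.1)).map (fun q => if q.1 == f then (f, v) else q))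
    rw [List.filter_map]
    congr 1
    apply List.filter_congr
    intro q _
    by_cases hq : q.1 = f
    · simp [Function.comp, hq, hp]
    · simp [Function.comp, hq]
  · have h0 : d.contains f = false := by simpa using h
    have h' : (pvFilterK p d).contains f = false := by
      rw [pvContains_filterK p d f hp]; exact h0
    show ((d.insert f v).items.filter (fun q => p q.1)) = ((pvFilterK p d).insert f v).items
    rw [PySem.Dict.items_insert_of_not_contains d _ h0,
        PySem.Dict.items_insert_of_not_contains _ _ h']
    show ((d.items ++ [(f, v)]).filter (fun q => p q.1))
        = (d.items.filter (fun q => p q.1)) ++ [(f, v)]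
    rw [List.filter_append]
    simp [hp]

lemma pvFilterK_insert_neg (p : String → Bool) (d : PySem.Dict String (List Int))
    (f : String) (v : List Int) (hp : p f = false) :
    pvFilterK p (d.insert f v) = pvFilterK p d := by
  apply PySem.Dict.ext
  by_cases h : d.contains f = true
  · show ((d.insert f v).items.filter (fun q => p q.1)) = (pvFilterK p d).items
    rw [PySem.Dict.items_insert_of_contains d _ h, List.filter_map]
    have h1 : (d.items.filter ((fun q => p q.1) ∘ fun q => if q.1 == f then (f, v) else q))
        = d.items.filter (fun q => p q.1) := by
      apply List.filter_congr
      intro q _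
      by_cases hq : q.1 = f
      · simp [Function.comp, hq, hp]
      · simp [Function.comp, hq]
    rw [h1]
    show ((d.items.filter (fun q => p q.1)).map (fun q => if q.1 == f then (f, v) else q))
        = d.items.filter (fun q => p q.1)
    apply (List.map_congr_left ?_).trans (List.map_id _)
    intro q hq
    have hpq := List.of_mem_filter hq
    have : q.1 ≠ f := fun he => by rw [he, hp] at hpq; exact Bool.false_ne_true hpq
    simp [this]
  · show ((d.insert f v).items.filter (fun q => p q.1)) = (pvFilterK p d).items
    rw [PySem.Dict.items_insert_of_not_contains d _ (by simpa using h), List.filter_append]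
    simp [hp]
    rfl

lemma pvFilterK_step (p : String → Bool) (d : PySem.Dict String (List Int)) (e : String × Int) :
    pvFilterK p (pvStep d e) = (if p e.1 then pvStep (pvFilterK p d) e else pvFilterK p d) := by
  rcases e with ⟨f, i⟩
  rw [pvStep_eq]
  by_cases hp : p f = true
  · rw [if_pos hp, pvFilterK_insert_pos p d f _ hp, pvStep_eq,
        pvGetD_filterK p d f [] hp]
  · simp only [Bool.not_eq_true] at hp
    rw [pvFilterK_insert_neg p d f _ hp, if_neg (by simp [hp])]

-- the guarded fold from a filtered start is the filter of the plain fold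
lemma pvFold_filterK (p : String → Bool) (l : List (String × Int))
    (d : PySem.Dict String (List Int)) :
    l.foldl (fun r e => if p e.1 then pvStep r e else r) (pvFilterK p d)
      = pvFilterK p (l.foldl pvStep d) := by
  induction l generalizing d with
  | nil => rfl
  | cons e t ih =>
    rw [List.foldl_cons, List.foldl_cons, ← pvFilterK_step p d e, ih]

lemma pvFilterK_empty (p : String → Bool) : pvFilterK p PySem.Dict.empty = PySem.Dict.empty := rfl

-- A's nested loops are the plain fold of pvStep over the flat occurrence stream
lemma pvA_norm (commits : List (List (String × List String))) :
    find_duplicate_files_py commits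
      = ((pvEntries commits).foldl pvStep PySem.Dict.empty).items.filter
          (fun q => q.2.length > 1) := by
  rw [find_duplicate_files_py, pvEntries, List.foldl_flatMap]
  congr 2
  apply PySem.List.foldl_congr_mem
  intro fc ic _
  show ((pvGet ic.2 "deleted").foldl _ ((pvGet ic.2 "files").foldl _ fc)) = _
  rw [List.map_append, List.foldl_append, List.foldl_map, List.foldl_map]
  simp only [pvStepA_eq]

-- B's first pass counts the flat key stream
lemma pvKeys_eq (commits : List (List (String × List String))) :
    pvKeys commits = commits.flatMap (fun c => pvGet c "files" ++ pvGet c "deleted") := by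
  rw [pvKeys, pvEntries, List.map_flatMap]
  have h : commits = (PySem.List.enumerate commits 1).map Prod.snd :=
    (PySem.List.map_snd_enumerate commits 1).symm
  conv_rhs => rw [h]
  rw [List.flatMap_map]
  congr 1
  funext ic
  rw [List.map_map]
  simp [Function.comp_def]

lemma pvCounts_eq (commits : List (List (String × List String))) :
    (commits.foldl
      (fun counts commit =>
        (pvGet commit "files" ++ pvGet commit "deleted").foldl
          (fun counts f => counts.insert f (counts.getD f 0 + 1)) counts)
      PySem.Dict.empty)
      = PySem.Dict.counter (pvKeys commits) := by
  rw [pvKeys_eq, ← PySem.Dict.foldl_insert_getD_add_one_eq_counter, List.foldl_flatMap]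

-- B's second pass is the key-guarded fold over the flat occurrence stream
lemma pvB_norm (commits : List (List (String × List String))) :
    find_duplicate_files_py_alt commits
      = ((pvEntries commits).foldl
          (fun r e => if decide (1 < (pvKeys commits).count e.1) then pvStep r e else r)
          PySem.Dict.empty).items := by
  rw [find_duplicate_files_py_alt]
  simp only [pvCounts_eq]
  congr 1
  rw [pvEntries, List.foldl_flatMap]
  apply PySem.List.foldl_congr_mem
  intro r ic _
  rw [List.foldl_map]
  apply PySem.List.foldl_congr_mem
  intro r' f _
  rw [pvStepB_eq, PySem.Dict.getD_counter]
  by_cases hc : 1 < (pvKeys commits).count f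
  · rw [if_pos (by exact_mod_cast hc), if_pos (by simpa using hc)]
  · rw [if_neg (by exact_mod_cast hc), if_neg (by simpa using hc)]

-- the full index dict: value at f = the indices of f's occurrences; keys nodup
lemma pvD_getD (commits : List (List (String × List String))) (f : String) :
    ((pvEntries commits).foldl pvStep PySem.Dict.empty).getD f []
      = ((pvEntries commits).filter (fun e => e.1 == f)).map (·.2) := by
  show ((pvEntries commits).foldl (fun d p => d.modify p.1 [] fun x => x ++ [p.2])
      PySem.Dict.empty).getD f [] = _
  rw [PySem.Dict.getD_foldl_modify_append]
  simp

lemma pvD_nodup (commits : List (List (String × List String))) :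
    ((pvEntries commits).foldl pvStep PySem.Dict.empty).keys.Nodup := by
  show ((pvEntries commits).foldl
      (fun d p => d.modify (Prod.fst p) [] ((fun d x => fun l => l ++ [x.2]) d p))
      PySem.Dict.empty).keys.Nodup
  exact PySem.Dict.nodup_keys_foldl_modify_key (pvEntries commits) Prod.fst []
    (fun d x => fun l => l ++ [x.2]) PySem.Dict.empty PySem.Dict.nodup_keys_empty

lemma pvLen_eq_count (commits : List (List (String × List String))) (f : String) :
    (((pvEntries commits).filter (fun e => e.1 == f)).map (·.2)).length
      = (pvKeys commits).count f := by
  rw [List.length_map, ← List.countP_eq_length_filter, pvKeys, List.count_eq_countP,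
      List.countP_map]
  rfl

-- ===== VERDICT (by name: the statement is the Claim_ definition above) =====
theorem find_duplicate_files_py_spec : Claim_equal_find_duplicate_files_py := by
  intro commits _
  show find_duplicate_files_py commits = find_duplicate_files_py_alt commits
  rw [pvA_norm, pvB_norm]
  set D := (pvEntries commits).foldl pvStep PySem.Dict.empty with hD
  have hfold : ((pvEntries commits).foldl
      (fun r e => if decide (1 < (pvKeys commits).count e.1) then pvStep r e else r)
      PySem.Dict.empty)
      = pvFilterK (fun f => decide (1 < (pvKeys commits).count f)) D := by
    rw [← pvFold_filterK, pvFilterK_empty]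
  rw [hfold]
  show D.items.filter (fun q => q.2.length > 1)
      = D.items.filter (fun q => decide (1 < (pvKeys commits).count q.1))
  apply List.filter_congr
  rintro ⟨f, v⟩ hq
  have hnd : D.keys.Nodup := by rw [hD]; exact pvD_nodup commits
  have hv : D.getD f [] = v := PySem.Dict.getD_of_mem_items D hq hnd []
  have hlen : v.length = (pvKeys commits).count f := by
    rw [← hv, hD, pvD_getD, pvLen_eq_count]
  simp [hlen]
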